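-- pv_equiv track=rewrite | github.com/hannws/Algorithm-Learning | 백준/Diamond/16214. N과 M/N과 M.py | solve
-- ===== SOURCE A (Python) =====
-- import math
--
-- def phi(x):
--     result = x
--     p = 2
--
--     while p * p <= x:
--         if x % p == 0:
--             while x % p == 0:
--                 x //= p
--             result -= result // p
--         p += 1
--
--     if x > 1:
--         result -= result // x
--
--     return result
--
-- def solve(n, m):
--     if m == 1:
--         return 0
--
--     phim = phi(m)
--     expo = solve(n, phim)
--
--     if (math.gcd(n, m) == 1):
--         return pow(n, expo, m)
--     else:
--         return pow(n, expo + phim, m)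
-- ===== SOURCE B (Python) =====
-- import math
--
-- def phi(x):
--     result = x
--     p = 2
--
--     while p * p <= x:
--         if x % p == 0:
--             while x % p == 0:
--                 x //= p
--             result -= result // p
--         p += 1
--
--     if x > 1:
--         result -= result // x
--
--     return result
--
-- def solve(n, m):
--     # Build the iterated-totient chain m, phi(m), phi(phi(m)), ..., 1 once,
--     # then fold upward from the innermost modulus instead of recursing.
--     moduli = [m]
--     while moduli[-1] != 1:
--         moduli.append(phi(moduli[-1]))
--     expo = 0
--     for mm, pm in zip(reversed(moduli[:-1]), reversed(moduli[1:])):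
--         if math.gcd(n, mm) == 1:
--             expo = pow(n, expo, mm)
--         else:
--             expo = pow(n, expo + pm, mm)
--     return expo
-- ===== Notes on version B (the rewrite author's own statement) =====
-- stated objective: alternative
-- what changed: B replaces A's top-down recursion by an explicit two-phase computation: it first builds the iterated-totient modulus chain [m, phi(m), ..., 1] with a while loop, then folds upward from the innermost modulus with an accumulator, applying the same gcd/Euler lifting step per level.
import Mathlib
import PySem

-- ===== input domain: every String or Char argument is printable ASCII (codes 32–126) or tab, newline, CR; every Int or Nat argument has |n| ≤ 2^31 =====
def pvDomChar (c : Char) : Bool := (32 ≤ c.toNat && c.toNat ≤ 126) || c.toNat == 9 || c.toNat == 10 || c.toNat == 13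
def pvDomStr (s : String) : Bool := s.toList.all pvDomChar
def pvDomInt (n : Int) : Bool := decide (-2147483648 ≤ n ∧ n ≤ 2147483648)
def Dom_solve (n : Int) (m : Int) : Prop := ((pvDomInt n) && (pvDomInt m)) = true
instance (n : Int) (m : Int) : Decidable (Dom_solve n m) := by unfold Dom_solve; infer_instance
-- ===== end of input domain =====

-- B replaces A's top-down recursion by building the iterated-totient modulus chain once and
-- folding it upward with an accumulator (objective: alternative decomposition, same cost).

-- ===== PORT A =====

-- inner 'while x % p == 0: x //= p' of phi; the fuel argument only makes the loop total, it is
-- never exhausted in a run reached from phi (x shrinks towards 1, so x.toNat + 1 steps suffice)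
def stripF (p : Int) : Nat → Int → Int
  | 0, x => x
  | k + 1, x =>
    if PySem.Int.mod x p = 0 then stripF p k (PySem.Int.floordiv x p) else x

-- outer 'while p * p <= x' loop of phi carrying (x, result); fuel is a totality guard only:
-- p grows by 1 each step, so the condition p * p <= x fails within the fuel given by phi
def phiLoopF : Nat → Int → Int → Int → Int × Int
  | 0, _, x, r => (x, r)
  | k + 1, p, x, r =>
    if p * p ≤ x then
      if PySem.Int.mod x p = 0 then
        phiLoopF k (p + 1) (stripF p (x.toNat + 1) x) (r - PySem.Int.floordiv r p)
      else
        phiLoopF k (p + 1) x r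
    else (x, r)

def phi (x : Int) : Int :=
  let res := phiLoopF (x.toNat + 2) 2 x x
  if 1 < res.1 then res.2 - PySem.Int.floordiv res.2 res.1 else res.2

-- A's solve; fuel is a totality guard for the recursion (phi m < m on every recursive call, so
-- m.toNat + 1 levels suffice; for m ≤ 0 the Python recursion never terminates — outside Pre_).
-- pow(n, e, m) is PySem.Int.powMod with Nat exponent e.toNat (e is nonnegative in every
-- reachable call: it is a previous powMod result, plus a positive phi value on the else branch).
def solveF (n : Int) : Nat → Int → Int
  | 0, _ => 0
  | k + 1, m =>
    if m = 1 then 0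
    else if 2 ≤ m then
      let phim := phi m
      let expo := solveF n k phim
      if Int.gcd n m = 1 then PySem.Int.powMod n expo.toNat m
      else PySem.Int.powMod n (expo + phim).toNat m
    else 0

def solve (n : Int) (m : Int) : Int := solveF n (m.toNat + 1) m

-- ===== PORT B =====

-- 'moduli = [m]; while moduli[-1] != 1: moduli.append(phi(moduli[-1]))'; fuel is the same
-- totality guard (phi strictly decreases, so m.toNat + 1 appends suffice; m ≤ 0 is outside Pre_)
def chainF : Nat → Int → List Int
  | 0, m => [m]
  | k + 1, m =>
    if m = 1 then [1]
    else if 2 ≤ m then m :: chainF k (phi m)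
    else [m]

-- 'for mm, pm in zip(reversed(moduli[:-1]), reversed(moduli[1:])): …' as structural recursion
-- from the tail of the chain upward (the last chain element is never a processed mm)
def foldUp (n : Int) : List Int → Int
  | [] => 0
  | [_] => 0
  | mm :: pm :: rest =>
    let e := foldUp n (pm :: rest)
    if Int.gcd n mm = 1 then PySem.Int.powMod n e.toNat mm
    else PySem.Int.powMod n (e + pm).toNat mm

def solve_alt (n : Int) (m : Int) : Int := foldUp n (chainF (m.toNat + 1) m)

-- ===== PRECONDITION & SPEC =====
-- Pre_ excludes m ≤ 0, on which Python A's recursion (and B's while loop) never reaches the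
-- base case and A dies with RecursionError; A returns normally exactly for m ≥ 1.
def Pre_solve (n : Int) (m : Int) : Prop := 1 ≤ m
instance (n : Int) (m : Int) : Decidable (Pre_solve n m) := by unfold Pre_solve; infer_instance
def pvWitness_solve : Int × Int := (3, 10)

def Spec_solve (n : Int) (m : Int) (out : Int) : Prop := out = solve_alt n m
instance (n : Int) (m : Int) (out : Int) : Decidable (Spec_solve n m out) := by unfold Spec_solve; infer_instance

-- ===== CLAIM (what is proved, stated in full; the proofs are below) =====
def Claim_equal_solve : Prop := ∀ (n : Int) (m : Int), Dom_solve n m → Pre_solve n m → Spec_solve n m (solve n m)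

-- ===== LEMMAS AND PROOFS =====

-- the loop invariant of phi's outer loop: result stays in [0, m], and can still equal the
-- initial m only while x does; hence the final correction step lands strictly below m
theorem phiLoopF_lt (m : Int) (hm : 2 ≤ m) :
    ∀ (k : Nat) (p x r : Int), 2 ≤ p → 0 ≤ r → r ≤ m → (r = m → x = m) →
    (if 1 < (phiLoopF k p x r).1 then
      (phiLoopF k p x r).2 - PySem.Int.floordiv (phiLoopF k p x r).2 (phiLoopF k p x r).1
     else (phiLoopF k p x r).2) < m := by
  intro k
  induction k with
  | zero =>
    intro p x r hp hr0 hrm hxr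
    simp only [phiLoopF]
    by_cases hx1 : 1 < x
    · rw [if_pos hx1]
      show r - PySem.Int.floordiv r x < m
      have hfd0 : 0 ≤ PySem.Int.floordiv r x := by
        rw [PySem.Int.le_floordiv_iff_mul_le (by omega)]; omega
      rcases lt_or_eq_of_le hrm with hlt | heq
      · omega
      · have hx := hxr heq
        have h1 : PySem.Int.floordiv r x = 1 := by
          rw [PySem.Int.floordiv_eq_ediv_of_pos (by omega), heq, hx]
          exact Int.ediv_self (by omega)
        omega
    · rw [if_neg hx1]
      show r < m
      rcases lt_or_eq_of_le hrm with hlt | heq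
      · exact hlt
      · exfalso; have := hxr heq; omega
  | succ k ih =>
    intro p x r hp hr0 hrm hxr
    rw [phiLoopF]
    by_cases hc : p * p ≤ x
    · rw [if_pos hc]
      by_cases hmod : PySem.Int.mod x p = 0
      · rw [if_pos hmod]
        have hfd0 : 0 ≤ PySem.Int.floordiv r p := by
          rw [PySem.Int.le_floordiv_iff_mul_le (by omega)]; omega
        have hfdle : PySem.Int.floordiv r p < r + 1 := by
          rw [PySem.Int.floordiv_lt_iff_lt_mul (by omega)]; nlinarith
        rcases lt_or_eq_of_le hrm with hlt | heq
        · exact ih (p + 1) _ _ (by omega) (by omega) (by omega)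
            (fun hc' => absurd hc' (by omega))
        · have hx := hxr heq
          have hpm : p ≤ x := le_trans (by nlinarith) hc
          have h3 : 1 ≤ PySem.Int.floordiv r p := by
            rw [PySem.Int.le_floordiv_iff_mul_le (by omega)]; omega
          exact ih (p + 1) _ _ (by omega) (by omega) (by omega)
            (fun hc' => absurd hc' (by omega))
      · rw [if_neg hmod]
        exact ih (p + 1) x r (by omega) hr0 hrm hxr
    · rw [if_neg hc]
      by_cases hx1 : 1 < x
      · rw [if_pos hx1]
        show r - PySem.Int.floordiv r x < m
        have hfd0 : 0 ≤ PySem.Int.floordiv r x := by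
          rw [PySem.Int.le_floordiv_iff_mul_le (by omega)]; omega
        rcases lt_or_eq_of_le hrm with hlt | heq
        · omega
        · have hx := hxr heq
          have h1 : PySem.Int.floordiv r x = 1 := by
            rw [PySem.Int.floordiv_eq_ediv_of_pos (by omega), heq, hx]
            exact Int.ediv_self (by omega)
          omega
      · rw [if_neg hx1]
        show r < m
        rcases lt_or_eq_of_le hrm with hlt | heq
        · exact hlt
        · exfalso; have := hxr heq; omega

theorem phi_lt (m : Int) (hm : 2 ≤ m) : phi m < m := by
  have h := phiLoopF_lt m hm (m.toNat + 2) 2 m m (by omega) (by omega) (by omega) (fun _ => rfl)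
  simpa [phi] using h

theorem chainF_head (k : Nat) (m : Int) : ∃ t, chainF k m = m :: t := by
  cases k with
  | zero => exact ⟨[], rfl⟩
  | succ k =>
    rw [chainF]
    split_ifs with h1 h2
    · exact ⟨[], by rw [h1]⟩
    · exact ⟨chainF k (phi m), rfl⟩
    · exact ⟨[], rfl⟩

theorem solveF_eq_foldUp (n : Int) :
    ∀ (k : Nat) (m : Int), m.toNat < k → solveF n k m = foldUp n (chainF k m) := by
  intro k
  induction k with
  | zero => intro m hm; omega
  | succ k ih =>
    intro m hm
    by_cases h1 : m = 1
    · subst h1; rw [solveF, chainF]; simp [foldUp]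
    · by_cases h2 : 2 ≤ m
      · rw [solveF, chainF]
        simp only [h1, if_false, h2, if_pos]
        obtain ⟨t, ht⟩ := chainF_head k (phi m)
        have hrec : solveF n k (phi m) = foldUp n (chainF k (phi m)) :=
          ih (phi m) (by have := phi_lt m h2; omega)
        rw [ht, foldUp, ← ht, ← hrec]
      · rw [solveF, chainF]
        simp [h1, h2, foldUp]

-- ===== VERDICT (by name: the statement is the Claim_ definition above) =====
theorem solve_spec : Claim_equal_solve := by
  intro n m _ _
  unfold Spec_solve solve_alt solve
  exact solveF_eq_foldUp n (m.toNat + 1) m (by omega)
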